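-- pv_equiv track=rewrite | github.com/liweitj47/nnlight | src/utility/configparser.py | expand_content
-- ===== SOURCE A (Python) =====
-- def expand_content(lines):
--     results = []
--     accu = []
--
--     def dfs(idx):
--         if idx == len(lines):
--             result = [line for line in accu]
--             results.append(result)
--             return
--         else:
--             line = lines[idx]
--             segs = line.split("=")
--             if len(segs) == 2:
--                 value = segs[1].strip()
--                 if value.startswith("{") and value.endswith("}"):
--                     terms = value[1:-1].split(",")
--                     for term in terms:
--                         selected_line = segs[0] + " = " + term
--                         accu.append(selected_line)
--                         dfs(idx+1)
--                         accu.pop()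
--                     return
--             accu.append(line)
--             dfs(idx+1)
--     dfs(0)
--     return results
-- ===== SOURCE B (Python) =====
-- def _line_options(line):
--     """Option list for an expandable '<key> = {a,b,...}' line, else None."""
--     segs = line.split("=")
--     if len(segs) == 2:
--         value = segs[1].strip()
--         if value.startswith("{") and value.endswith("}"):
--             return [segs[0] + " = " + term for term in value[1:-1].split(",")]
--     return None
--
--
-- def expand_content(lines):
--     option_lists = []
--     for line in lines:
--         opts = _line_options(line)
--         option_lists.append([line] if opts is None else opts)
--     # cartesian product, leftmost choice varying slowest
--     results = [[]]
--     for opts in reversed(option_lists):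
--         results = [[opt] + row for opt in opts for row in results]
--     return results
-- ===== Notes on version B (the rewrite author's own statement) =====
-- stated objective: idiomatic
-- what changed: Replaced the recursive DFS over a shared mutable accumulator by parsing each line into its option list once and then building the cartesian product iteratively back-to-front.
-- intended difference: When a line of the form '<key> = {t1,t2,...}' with at least two alternatives is followed by a non-expandable line, A's fall-through branch appends to the shared accumulator without popping, so every combination after the first alternative carries duplicated leftover lines; B returns the clean cartesian product of the per-line option lists, which is the intended expansion. — e.g. on expand_content(["a = {x,y}", "b"]): A returns [["a = x", "b"], ["a = x", "a = y", "b"]], B returns [["a = x", "b"], ["a = y", "b"]]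
import Mathlib
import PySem

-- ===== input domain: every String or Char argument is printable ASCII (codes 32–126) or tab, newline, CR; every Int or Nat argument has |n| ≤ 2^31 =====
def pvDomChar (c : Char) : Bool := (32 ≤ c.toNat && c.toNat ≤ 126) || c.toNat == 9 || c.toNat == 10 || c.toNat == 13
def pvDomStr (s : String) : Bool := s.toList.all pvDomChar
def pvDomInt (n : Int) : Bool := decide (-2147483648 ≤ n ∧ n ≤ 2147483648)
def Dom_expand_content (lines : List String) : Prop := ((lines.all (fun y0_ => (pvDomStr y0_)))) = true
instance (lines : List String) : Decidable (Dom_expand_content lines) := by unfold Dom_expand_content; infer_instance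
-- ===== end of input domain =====

-- B parses each line into its option list once and builds the cartesian product iteratively,
-- instead of A's recursive DFS over a shared mutable accumulator (objective: idiomatic).
-- Outside D_ below the two agree exactly; inside D_ A's missing pop leaks lines (see D_ comment).

-- ===== PORT A =====
-- Python's mutable `accu`/`results` are threaded as state: pvDfsA rest accu = (results, accu-after).
-- `accu.pop()` is `dropLast`: the popped list is never empty (a line was just pushed), so no IndexError.
def pvDfsA : List String → List String → (List (List String)) × List String
  | [], accu => ([accu], accu)
  | line :: rest, accu =>
    let segs := (PySem.Str.split? line "=").getD []   -- sep "=" ≠ "", so split? is never none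
    if segs.length = 2 then
      let value := PySem.Str.strip (segs.getD 1 "")
      if PySem.Str.startswith value "{" && PySem.Str.endswith value "}" then
        let terms := (PySem.Str.split? (PySem.Str.slice value (some 1) (some (-1))) ",").getD []
        terms.foldl
          (fun st term =>
            let acc1 := st.2 ++ [segs.getD 0 "" ++ " = " ++ term]
            let r := pvDfsA rest acc1
            (st.1 ++ r.1, r.2.dropLast))
          ([], accu)
      else pvDfsA rest (accu ++ [line])
    else pvDfsA rest (accu ++ [line])

def expand_content (lines : List String) : List (List String) :=
  (pvDfsA lines []).1

-- ===== PORT B =====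
-- Source B's _line_options helper: option list for an expandable line, else none
def pvLineOptions? (line : String) : Option (List String) :=
  let segs := (PySem.Str.split? line "=").getD []   -- sep "=" ≠ "", so split? is never none
  if segs.length = 2 then
    let value := PySem.Str.strip (segs.getD 1 "")
    if PySem.Str.startswith value "{" && PySem.Str.endswith value "}" then
      some ((((PySem.Str.split? (PySem.Str.slice value (some 1) (some (-1))) ",").getD []).map
        (fun term => segs.getD 0 "" ++ " = " ++ term)))
    else none
  else none

-- Source B: map each line to its option list, then the reversed-loop product (= foldr)
def expand_content_alt (lines : List String) : List (List String) :=
  let optionLists := lines.map (fun line => (pvLineOptions? line).getD [line])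
  optionLists.foldr
    (fun opts results => opts.flatMap (fun opt => results.map (fun row => opt :: row))) [[]]

-- ===== PRECONDITION & SPEC =====
-- line classifier for D_ (character-level input inspection; independent of the ports):
-- 0 = not expandable, 1 = expandable '<key> = {...}' with one alternative, 2 = with several
def pvClass (l : String) : Nat :=
  let v := PySem.Chars.strip ((l.toList.dropWhile (· ≠ '=')).drop 1)
  if l.toList.count '=' == 1 && v.head? == some '{' && v.getLast? == some '}' then
    1 + ((v.drop 1).dropLast.contains ',').toNat
  else 0

-- On inputs where a '<key> = {t1,t2,...}' line with ≥2 alternatives is followed by a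
-- non-expandable line, A's fall-through branch appends to the shared accumulator without
-- popping, so combinations after the first alternative contain duplicated leftover lines;
-- B returns the clean cartesian product, which is the intended expansion.
def D_expand_content (lines : List String) : Prop :=
  ((lines.dropWhile (pvClass · != 2)).drop 1).any (pvClass · == 0)
instance (lines : List String) : Decidable (D_expand_content lines) := by
  unfold D_expand_content; infer_instance

def Spec_expand_content (lines : List String) (out : List (List String)) : Prop :=
  ¬ D_expand_content lines → out = expand_content_alt lines
instance (lines : List String) (out : List (List String)) : Decidable (Spec_expand_content lines out) := by unfold Spec_expand_content; infer_instance

def pvDiffWitness_expand_content : List String := ["a = {x,y}", "b"]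
def pvDiffWitnessOut_expand_content : (List (List String)) × (List (List String)) :=
  ([["a  = x", "b"], ["a  = x", "a  = y", "b"]],
   [["a  = x", "b"], ["a  = y", "b"]])

-- ===== CLAIM (what is proved, stated in full; the proofs are below) =====
def Claim_unchanged_expand_content : Prop :=
  ∀ (lines : List String), Dom_expand_content lines →
    Spec_expand_content lines (expand_content lines)
def Claim_changed_expand_content : Prop :=
  Dom_expand_content (pvDiffWitness_expand_content) ∧
  D_expand_content (pvDiffWitness_expand_content) ∧
  expand_content (pvDiffWitness_expand_content) = pvDiffWitnessOut_expand_content.1 ∧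
  expand_content_alt (pvDiffWitness_expand_content) = pvDiffWitnessOut_expand_content.2 ∧
  pvDiffWitnessOut_expand_content.1 ≠ pvDiffWitnessOut_expand_content.2
def Claim_exact_expand_content : Prop :=
  ∀ (lines : List String), Dom_expand_content lines → D_expand_content lines →
    expand_content lines ≠ expand_content_alt lines

-- ===== LEMMAS AND PROOFS =====

-- One reversed-loop step characterising A's DFS (proof-only device):
-- (R, H) = (result rows the suffix produces relative to the prefix, lines it leaves on accu)
def pvStepB (line : String) (st : (List (List String)) × List String) :
    (List (List String)) × List String :=
  match pvLineOptions? line with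
  | none => (st.1.map (fun row => line :: row), line :: st.2)
  | some opts =>
    opts.foldl
      (fun acc opt =>
        (acc.1 ++ st.1.map (fun row => acc.2 ++ opt :: row),
         acc.2 ++ (opt :: st.2).dropLast))
      ([], [])

-- Inner loop correspondence: A's per-term loop relates to B's per-option loop by
-- prefixing every result row and the leftover accumulator with `accu`.
theorem pvDfsA_foldl_eq (rest : List String) (R : List (List String)) (H : List String)
    (ih : ∀ accu, pvDfsA rest accu = (R.map (fun row => accu ++ row), accu ++ H))
    (fmt : String → String) (terms : List String) :
    ∀ (accu : List String) (res0 : List (List String)) (pre0 : List String),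
      terms.foldl
          (fun st term =>
            (st.1 ++ (pvDfsA rest (st.2 ++ [fmt term])).1,
             (pvDfsA rest (st.2 ++ [fmt term])).2.dropLast))
          (res0.map (fun row => accu ++ row), accu ++ pre0)
      = ((terms.foldl
            (fun acc term =>
              (acc.1 ++ R.map (fun row => acc.2 ++ fmt term :: row),
               acc.2 ++ (fmt term :: H).dropLast)) (res0, pre0)).1.map
            (fun row => accu ++ row),
         accu ++ (terms.foldl
            (fun acc term =>
              (acc.1 ++ R.map (fun row => acc.2 ++ fmt term :: row),
               acc.2 ++ (fmt term :: H).dropLast)) (res0, pre0)).2) := by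
  induction terms with
  | nil => intro accu res0 pre0; rfl
  | cons term ts iht =>
    intro accu res0 pre0
    have hstep :
        ((res0.map (fun row => accu ++ row), accu ++ pre0) :
            (List (List String)) × List String).1 ++
            (pvDfsA rest ((accu ++ pre0) ++ [fmt term])).1 =
          ((res0 ++ R.map (fun row => pre0 ++ fmt term :: row)).map (fun row => accu ++ row)) := by
      rw [ih]
      simp [List.map_map, Function.comp, List.append_assoc]
    have hacc :
        (pvDfsA rest ((accu ++ pre0) ++ [fmt term])).2.dropLast =
          accu ++ (pre0 ++ (fmt term :: H).dropLast) := by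
      rw [ih]
      rw [show (accu ++ pre0) ++ [fmt term] ++ H = (accu ++ pre0) ++ (fmt term :: H) by simp]
      rw [List.dropLast_append_of_ne_nil (by simp)]
      simp
    simp only [List.foldl_cons]
    rw [hstep, hacc]
    exact iht accu (res0 ++ R.map (fun row => pre0 ++ fmt term :: row))
      (pre0 ++ (fmt term :: H).dropLast)

theorem pvDfsA_eq (lines : List String) (accu : List String) :
    pvDfsA lines accu =
      (((lines.foldr pvStepB ([[]], [])).1).map (fun row => accu ++ row),
       accu ++ (lines.foldr pvStepB ([[]], [])).2) := by
  induction lines generalizing accu with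
  | nil => simp [pvDfsA]
  | cons line rest ih =>
    by_cases h1 : ((PySem.Str.split? line "=").getD []).length = 2
    · by_cases h2 : (PySem.Str.startswith
          (PySem.Str.strip (((PySem.Str.split? line "=").getD []).getD 1 "")) "{" &&
          PySem.Str.endswith
          (PySem.Str.strip (((PySem.Str.split? line "=").getD []).getD 1 "")) "}") = true
      · simp only [pvDfsA, pvStepB, pvLineOptions?, List.foldr_cons, h1, h2, if_true,
          List.foldl_map]
        have := pvDfsA_foldl_eq rest (rest.foldr pvStepB ([[]], [])).1
          (rest.foldr pvStepB ([[]], [])).2 (fun a => ih a)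
          (fun term => ((PySem.Str.split? line "=").getD []).getD 0 "" ++ " = " ++ term)
          ((PySem.Str.split? (PySem.Str.slice
            (PySem.Str.strip (((PySem.Str.split? line "=").getD []).getD 1 ""))
            (some 1) (some (-1))) ",").getD []) accu [] []
        simpa using this
      · simp only [pvDfsA, pvStepB, pvLineOptions?, List.foldr_cons, h1, h2, if_true,
          Bool.false_eq_true, if_false]
        rw [ih]
        simp [List.map_map, Function.comp, List.append_assoc]
    · simp only [pvDfsA, pvStepB, pvLineOptions?, List.foldr_cons, h1, if_false]
      rw [ih]
      simp [List.map_map, Function.comp, List.append_assoc]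

-- bridges between the D_ classifiers and the ports' split/strip pipeline
def pvSplit1 (c : Char) : List Char → List (List Char)
  | [] => [[]]
  | x :: rest =>
    if x = c then [] :: pvSplit1 c rest
    else
      match pvSplit1 c rest with
      | [] => [[x]]
      | h :: t => (x :: h) :: t

theorem pvSplit1_ne_nil (c : Char) (l : List Char) : pvSplit1 c l ≠ [] := by
  induction l with
  | nil => simp [pvSplit1]
  | cons x rest ih =>
    unfold pvSplit1
    split_ifs
    · simp
    · cases h : pvSplit1 c rest <;> simp


theorem splitOn_go_eq (c : Char) :
    ∀ (l : List Char) (fuel : Nat) (cur : List Char) (acc : List (List Char)),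
      l.length < fuel →
      PySem.Chars.splitOn.go [c] fuel l cur acc =
        acc.reverse ++
          (match pvSplit1 c l with
           | [] => []
           | h :: t => (cur.reverse ++ h) :: t) := by
  intro l
  induction l with
  | nil =>
    intro fuel cur acc hf
    match fuel, hf with
    | fuel + 1, _ =>
      simp only [PySem.Chars.splitOn.go, pvSplit1]
      simp
  | cons x rest ih =>
    intro fuel cur acc hf
    match fuel, hf with
    | fuel + 1, hf =>
      simp only [PySem.Chars.splitOn.go]
      by_cases hx : x = c
      · subst hx
        have hpre : [x].isPrefixOf (x :: rest) = true := by simp [List.isPrefixOf]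
        rw [if_pos hpre]
        have := ih fuel [] (cur.reverse :: acc) (by simpa using Nat.lt_of_succ_lt_succ hf)
        simp only [List.length_cons] at this ⊢
        rw [show List.drop ([].length + 1) (x :: rest) = rest by simp]
        rw [this]
        cases h : pvSplit1 x rest with
        | nil => exact absurd h (pvSplit1_ne_nil x rest)
        | cons h0 t =>
          simp [pvSplit1, h]
      · have hpre : [c].isPrefixOf (x :: rest) = false := by
          simp [List.isPrefixOf]
          intro h; exact absurd h.symm hx
        rw [if_neg (by simp [hpre])]
        have := ih fuel (x :: cur) acc (by simpa using Nat.lt_of_succ_lt_succ hf)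
        rw [this]
        cases h : pvSplit1 c rest with
        | nil => exact absurd h (pvSplit1_ne_nil c rest)
        | cons h0 t =>
          simp [pvSplit1, hx, h]

theorem splitOn_eq_pvSplit1 (l : List Char) (c : Char) :
    PySem.Chars.splitOn l [c] = pvSplit1 c l := by
  unfold PySem.Chars.splitOn
  rw [splitOn_go_eq c l (l.length + 1) [] [] (by omega)]
  cases h : pvSplit1 c l with
  | nil => exact absurd h (pvSplit1_ne_nil c l)
  | cons h0 t => simp

theorem length_pvSplit1 (c : Char) (l : List Char) :
    (pvSplit1 c l).length = l.count c + 1 := by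
  induction l with
  | nil => simp [pvSplit1]
  | cons x rest ih =>
    unfold pvSplit1
    by_cases hx : x = c
    · subst hx; simp [List.count_cons, ih]
    · cases h : pvSplit1 c rest with
      | nil => exact absurd h (pvSplit1_ne_nil c rest)
      | cons h0 t =>
        have hlen := ih
        rw [h] at hlen
        simp only [List.length_cons] at hlen
        simp [hx, h, List.count_cons]
        omega

theorem pvSplit1_of_not_mem (c : Char) (l : List Char) (h : c ∉ l) :
    pvSplit1 c l = [l] := by
  induction l with
  | nil => simp [pvSplit1]
  | cons x rest ih =>
    simp at h
    simp [pvSplit1, Ne.symm h.1, ih h.2]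

theorem pvSplit1_of_count_one (c : Char) (l : List Char) (h : l.count c = 1) :
    pvSplit1 c l = [l.takeWhile (· ≠ c), (l.dropWhile (· ≠ c)).drop 1] := by
  induction l with
  | nil => simp at h
  | cons x rest ih =>
    by_cases hx : x = c
    · subst hx
      simp [List.count_cons] at h
      rw [pvSplit1, if_pos rfl, pvSplit1_of_not_mem x rest (by simpa using List.count_eq_zero.mp h)]
      simp [List.takeWhile, List.dropWhile]
    · have h' : rest.count c = 1 := by simpa [List.count_cons, hx] using h
      rw [pvSplit1, if_neg hx, ih h']
      simp [List.takeWhile_cons, List.dropWhile_cons, hx]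

theorem startswith_head (v : List Char) (c : Char) :
    PySem.Chars.startswith v [c] = (v.head? == some c) := by
  cases v <;> simp [PySem.Chars.startswith, List.isPrefixOf] <;> exact eq_comm

theorem endswith_getLast (v : List Char) (c : Char) :
    PySem.Chars.endswith v [c] = (v.getLast? == some c) := by
  rw [Bool.eq_iff_iff]
  rw [show (PySem.Chars.endswith v [c] = true) ↔ [c] <:+ v from PySem.Chars.endswith_iff v [c]]
  simp only [beq_iff_eq, List.getLast?_eq_some_iff]
  constructor
  · rintro ⟨ys, h⟩; exact ⟨ys, h.symm⟩
  · rintro ⟨ys, h⟩; exact ⟨ys, h.symm⟩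

theorem slice_one_negone (v : List Char) :
    PySem.List.slice v (some 1) (some (-1)) = (v.drop 1).dropLast := by
  cases v with
  | nil => simp [PySem.List.slice]
  | cons x rest =>
    simp [PySem.List.slice, List.dropLast_eq_take]

def pvVal (line : String) : List Char :=
  PySem.Chars.strip ((line.toList.dropWhile (· ≠ '=')).drop 1)

def pvBraceLine (line : String) : Bool :=
  line.toList.count '=' == 1 &&
  ((pvVal line).head? == some '{') && ((pvVal line).getLast? == some '}')

def pvMultiLine (line : String) : Bool :=
  pvBraceLine line && ((pvVal line).drop 1).dropLast.contains ','

theorem pvClass_eq (l : String) :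
    pvClass l =
      if pvBraceLine l then 1 + (((pvVal l).drop 1).dropLast.contains ',').toNat else 0 := rfl

theorem pvClass_zero_iff (l : String) : (pvClass l == 0) = !pvBraceLine l := by
  rw [pvClass_eq]
  cases hb : pvBraceLine l <;> simp

theorem pvClass_two_iff (l : String) : (pvClass l == 2) = pvMultiLine l := by
  rw [pvClass_eq]
  unfold pvMultiLine
  cases hb : pvBraceLine l <;> cases hc : ((pvVal l).drop 1).dropLast.contains ',' <;>
    simp [hb, hc]

def pvStripWs (cs : List Char) : List Char :=
  ((cs.dropWhile PySem.Chars.isspace).reverse.dropWhile PySem.Chars.isspace).reverse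

theorem split_getD (line sep : String) (c : Char) (hs : sep.toList = [c]) :
    (PySem.Str.split? line sep).getD [] = (pvSplit1 c line.toList).map String.ofList := by
  simp [PySem.Str.split?, PySem.Chars.split?, hs, splitOn_eq_pvSplit1]

theorem strip_ofList (cs : List Char) :
    (PySem.Str.strip (String.ofList cs)).toList = pvStripWs cs := by
  simp [PySem.Str.toList_strip]
  rfl

theorem hbrace_eq (line : String) (cs : List Char) (hcs : cs = (line.toList.dropWhile (· ≠ '=')).drop 1) :
    (PySem.Str.startswith (PySem.Str.strip (String.ofList cs)) "{" &&
     PySem.Str.endswith (PySem.Str.strip (String.ofList cs)) "}")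
    = (((pvVal line).head? == some '{') && ((pvVal line).getLast? == some '}')) := by
  simp only [PySem.Str.startswith_eq, PySem.Str.endswith_eq]
  rw [strip_ofList]
  rw [show ("{" : String).toList = ['{'] from rfl, show ("}" : String).toList = ['}'] from rfl]
  rw [startswith_head, endswith_getLast]
  rw [hcs]
  rfl

theorem pvBraceLine_eq_isSome (line : String) :
    pvBraceLine line = (pvLineOptions? line).isSome := by
  unfold pvBraceLine pvLineOptions?
  rw [split_getD line "=" '=' rfl]
  by_cases hc : line.toList.count '=' = 1
  · rw [pvSplit1_of_count_one '=' line.toList hc]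
    simp only [List.map_cons, List.map_nil]
    rw [show ([String.ofList (line.toList.takeWhile (· ≠ '=')),
        String.ofList ((line.toList.dropWhile (· ≠ '=')).drop 1)] : List String).getD 1 "" =
        String.ofList ((line.toList.dropWhile (· ≠ '=')).drop 1) from rfl]
    split_ifs with hlen hbr
    · rw [hbrace_eq line _ rfl] at hbr
      simp only [Bool.and_eq_true, beq_iff_eq] at hbr
      simp [hbr.1, hbr.2, hc]
    · rw [hbrace_eq line _ rfl] at hbr
      simp only [Option.isSome_none]
      rw [Bool.eq_false_iff]
      intro hcon
      apply hbr
      simp only [Bool.and_eq_true, beq_iff_eq] at hcon ⊢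
      exact ⟨hcon.1.2, hcon.2⟩
    · exact absurd (by simp) hlen
  · have hlen : ¬ ((pvSplit1 '=' line.toList).map String.ofList).length = 2 := by
      simp [length_pvSplit1]
      omega
    rw [if_neg hlen]
    simp [hc]

theorem pvMultiLine_of_opts (line : String) (opts : List String)
    (h : pvLineOptions? line = some opts) (h2 : 2 ≤ opts.length) :
    pvMultiLine line = true := by
  have hbrace : pvBraceLine line = true := by
    rw [pvBraceLine_eq_isSome, h]; rfl
  unfold pvMultiLine
  rw [hbrace, Bool.true_and]
  unfold pvLineOptions? at h
  rw [split_getD line "=" '=' rfl] at h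
  by_cases hc : line.toList.count '=' = 1
  · rw [pvSplit1_of_count_one '=' line.toList hc] at h
    simp only [List.map_cons, List.map_nil] at h
    rw [if_pos (by simp)] at h
    rw [show ([String.ofList (line.toList.takeWhile (· ≠ '=')),
        String.ofList ((line.toList.dropWhile (· ≠ '=')).drop 1)] : List String).getD 1 "" =
        String.ofList ((line.toList.dropWhile (· ≠ '=')).drop 1) from rfl] at h
    split_ifs at h with hbr
    · -- h : some (terms.map fmt) = some opts
      have hopts := Option.some_injective _ h
      have hlen : opts.length =
          ((PySem.Str.split? (PySem.Str.slice
            (PySem.Str.strip (String.ofList ((line.toList.dropWhile (· ≠ '=')).drop 1)))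
            (some 1) (some (-1))) ",").getD []).length := by
        rw [← hopts]; simp
      rw [split_getD _ "," ',' rfl, List.length_map, length_pvSplit1] at hlen
      have hcnt : 1 ≤ (PySem.Str.slice
          (PySem.Str.strip (String.ofList ((line.toList.dropWhile (· ≠ '=')).drop 1)))
          (some 1) (some (-1))).toList.count ',' := by omega
      have hmem : ',' ∈ (PySem.Str.slice
          (PySem.Str.strip (String.ofList ((line.toList.dropWhile (· ≠ '=')).drop 1)))
          (some 1) (some (-1))).toList := by
        exact List.count_pos_iff.mp (by omega)
      rw [PySem.Str.toList_slice] at hmem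
      rw [PySem.Chars.slice_eq_listSlice, slice_one_negone] at hmem
      rw [strip_ofList] at hmem
      rw [show pvVal line = pvStripWs ((line.toList.dropWhile (· ≠ '=')).drop 1) from rfl]
      simpa using hmem
  · rw [if_neg (by simp [length_pvSplit1]; omega)] at h
    cases h

theorem notD_tail (l : String) (rest : List String)
    (h : ¬ D_expand_content (l :: rest)) : ¬ D_expand_content rest := by
  intro hD
  apply h
  unfold D_expand_content at hD ⊢
  by_cases hc : (pvClass l != 2) = true
  · simpa [List.dropWhile_cons, hc] using hD
  · have hc2 : pvClass l = 2 := by simpa using hc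
    have hdrop : List.dropWhile (fun x => pvClass x != 2) (l :: rest) = l :: rest := by
      rw [List.dropWhile_cons, show (pvClass l != 2) = false from by simp [hc2]]
      simp
    rw [hdrop]
    simp only [List.drop_succ_cons, List.drop_zero]
    obtain ⟨x, hx, hpx⟩ := List.any_eq_true.mp hD
    exact List.any_eq_true.mpr
      ⟨x, ((List.drop_sublist _ _).trans (List.dropWhile_sublist _)).subset hx, hpx⟩

theorem notD_head (l : String) (rest : List String)
    (h : ¬ D_expand_content (l :: rest)) (hm : pvMultiLine l = true) :
    rest.all pvBraceLine = true := by
  have hc : (pvClass l != 2) = false := by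
    simp [bne, pvClass_two_iff, hm]
  rw [List.all_eq_true]
  intro x hx
  by_contra hbx
  apply h
  unfold D_expand_content
  have hdrop : List.dropWhile (fun x => pvClass x != 2) (l :: rest) = l :: rest := by
    rw [List.dropWhile_cons, hc]
    simp
  rw [hdrop]
  simp only [List.drop_succ_cons, List.drop_zero]
  exact List.any_eq_true.mpr ⟨x, hx, by rw [pvClass_zero_iff]; simpa using hbx⟩

-- with an empty leak list, the per-option loop is exactly the product step
theorem pvFoldl_H_nil (R : List (List String)) (opts : List String) :
    ∀ A0 : List (List String),
      opts.foldl
        (fun acc opt =>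
          (acc.1 ++ R.map (fun row => acc.2 ++ opt :: row),
           acc.2 ++ (opt :: ([] : List String)).dropLast))
        (A0, []) =
      (A0 ++ opts.flatMap (fun opt => R.map (fun row => opt :: row)), []) := by
  induction opts with
  | nil => intro A0; simp
  | cons o os ih =>
    intro A0
    simpa [List.flatMap_cons, List.append_assoc] using ih (A0 ++ R.map (fun row => o :: row))

theorem stepB_brace_H_nil (line : String) (opts : List String) (R : List (List String))
    (h : pvLineOptions? line = some opts) :
    pvStepB line (R, []) = (opts.flatMap (fun opt => R.map (fun row => opt :: row)), []) := by
  simp only [pvStepB, h]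
  simpa using pvFoldl_H_nil R opts []

-- an all-expandable suffix leaves nothing on the accumulator
theorem H_nil_of_all_brace (lines : List String)
    (h : lines.all pvBraceLine = true) :
    (lines.foldr pvStepB ([[]], [])).2 = [] := by
  induction lines with
  | nil => simp
  | cons l rest ih =>
    simp only [List.all_cons, Bool.and_eq_true] at h
    have hb := h.1
    rw [pvBraceLine_eq_isSome] at hb
    obtain ⟨opts, hopts⟩ := Option.isSome_iff_exists.mp hb
    have hrest := ih h.2
    simp only [List.foldr_cons]
    rw [show (rest.foldr pvStepB ([[]], [])) =
        ((rest.foldr pvStepB ([[]], [])).1, []) from Prod.ext rfl hrest]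
    rw [stepB_brace_H_nil _ _ _ hopts]

-- unfolding of B's product one line at a time
theorem alt_cons (l : String) (rest : List String) :
    expand_content_alt (l :: rest) =
      ((pvLineOptions? l).getD [l]).flatMap
        (fun opt => (expand_content_alt rest).map (fun row => opt :: row)) := by
  simp [expand_content_alt]

-- outside D_, the DFS characterisation collapses to the cartesian product
theorem foldr_stepB_eq_alt (lines : List String)
    (h : ¬ D_expand_content lines) :
    (lines.foldr pvStepB ([[]], [])).1 = expand_content_alt lines := by
  induction lines with
  | nil => simp [expand_content_alt]
  | cons l rest ih =>
    have hrest := ih (notD_tail l rest h)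
    simp only [List.foldr_cons]
    cases hopt : pvLineOptions? l with
    | none =>
      rw [alt_cons, hopt]
      simp [pvStepB, hopt, hrest]
    | some opts =>
      match opts, hopt with
      | [], hopt =>
        rw [alt_cons, hopt]
        simp [pvStepB, hopt]
      | [o], hopt =>
        rw [alt_cons, hopt]
        simp [pvStepB, hopt, hrest]
      | o1 :: o2 :: os, hopt =>
        have hm : pvMultiLine l = true :=
          pvMultiLine_of_opts l _ hopt (by simp)
        have hH : (rest.foldr pvStepB ([[]], [])).2 = [] :=
          H_nil_of_all_brace rest (notD_head l rest h hm)
        rw [show (rest.foldr pvStepB ([[]], [])) =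
            ((rest.foldr pvStepB ([[]], [])).1, []) from Prod.ext rfl hH]
        rw [stepB_brace_H_nil _ _ _ hopt, alt_cons, hopt]
        simp [hrest]

-- ===== tightness: inside D_ the two programs always differ =====

-- the second component of pvStepB's inner fold ignores the first
theorem stepB_foldl_snd (R : List (List String)) (H : List String) :
    ∀ (opts : List String) (A : List (List String)) (a : List String),
      (opts.foldl
        (fun (acc : List (List String) × List String) opt =>
          (acc.1 ++ R.map (fun row => acc.2 ++ opt :: row),
           acc.2 ++ (opt :: H).dropLast)) (A, a)).2 =
      opts.foldl (fun a opt => a ++ (opt :: H).dropLast) a := by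
  intro opts
  induction opts with
  | nil => intro A a; rfl
  | cons o os ih => intro A a; exact ih _ _

-- the first component only ever grows by appending
theorem stepB_foldl_fst_exists (R : List (List String)) (H : List String) :
    ∀ (opts : List String) (A : List (List String)) (a : List String),
      ∃ s, (opts.foldl
        (fun (acc : List (List String) × List String) opt =>
          (acc.1 ++ R.map (fun row => acc.2 ++ opt :: row),
           acc.2 ++ (opt :: H).dropLast)) (A, a)).1 = A ++ s := by
  intro opts
  induction opts with
  | nil => intro A a; exact ⟨[], by simp⟩
  | cons o os ih =>
    intro A a
    obtain ⟨s, hs⟩ := ih (A ++ R.map (fun row => a ++ o :: row)) (a ++ (o :: H).dropLast)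
    exact ⟨_, by rw [List.foldl_cons, hs, List.append_assoc]⟩

theorem stepB_foldl_fst_length (R : List (List String)) (H : List String) :
    ∀ (opts : List String) (A : List (List String)) (a : List String),
      (opts.foldl
        (fun (acc : List (List String) × List String) opt =>
          (acc.1 ++ R.map (fun row => acc.2 ++ opt :: row),
           acc.2 ++ (opt :: H).dropLast)) (A, a)).1.length =
        A.length + opts.length * R.length := by
  intro opts
  induction opts with
  | nil => intro A a; simp
  | cons o os ih =>
    intro A a
    rw [List.foldl_cons, ih]
    simp
    ring

-- how long each option list is, in terms of the D_ classifier's view of the line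
theorem opts_length_eq (line : String) (opts : List String)
    (h : pvLineOptions? line = some opts) :
    opts.length = ((pvVal line).drop 1).dropLast.count ',' + 1 := by
  unfold pvLineOptions? at h
  rw [split_getD line "=" '=' rfl] at h
  by_cases hc : line.toList.count '=' = 1
  · rw [pvSplit1_of_count_one '=' line.toList hc] at h
    simp only [List.map_cons, List.map_nil] at h
    rw [if_pos (by simp)] at h
    rw [show ([String.ofList (line.toList.takeWhile (· ≠ '=')),
        String.ofList ((line.toList.dropWhile (· ≠ '=')).drop 1)] : List String).getD 1 "" =
        String.ofList ((line.toList.dropWhile (· ≠ '=')).drop 1) from rfl] at h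
    split_ifs at h with hbr
    · have hopts := Option.some_injective _ h
      have hlen : opts.length =
          ((PySem.Str.split? (PySem.Str.slice
            (PySem.Str.strip (String.ofList ((line.toList.dropWhile (· ≠ '=')).drop 1)))
            (some 1) (some (-1))) ",").getD []).length := by
        rw [← hopts]; simp
      rw [split_getD _ "," ',' rfl, List.length_map, length_pvSplit1] at hlen
      have hinner : (PySem.Str.slice
          (PySem.Str.strip (String.ofList ((line.toList.dropWhile (· ≠ '=')).drop 1)))
          (some 1) (some (-1))).toList = ((pvVal line).drop 1).dropLast := by
        rw [PySem.Str.toList_slice, PySem.Chars.slice_eq_listSlice, slice_one_negone,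
          strip_ofList]
        rfl
      rw [hinner] at hlen
      exact hlen
  · rw [if_neg (by simp [length_pvSplit1]; omega)] at h
    cases h

theorem opts_ne_nil (line : String) (opts : List String)
    (h : pvLineOptions? line = some opts) : opts ≠ [] := by
  have := opts_length_eq line opts h
  intro hn
  rw [hn] at this
  simp at this

theorem opts_single (line : String) (opts : List String)
    (h : pvLineOptions? line = some opts)
    (hc : ((pvVal line).drop 1).dropLast.contains ',' = false) : ∃ o, opts = [o] := by
  have hl := opts_length_eq line opts h
  have hz : ((pvVal line).drop 1).dropLast.count ',' = 0 :=
    List.count_eq_zero.mpr (by simpa using hc)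
  rw [hz] at hl
  match opts, hl with
  | [o], _ => exact ⟨o, rfl⟩

theorem opts_two (line : String) (opts : List String)
    (h : pvLineOptions? line = some opts)
    (hc : ((pvVal line).drop 1).dropLast.contains ',' = true) : 2 ≤ opts.length := by
  have hl := opts_length_eq line opts h
  have hz : 0 < ((pvVal line).drop 1).dropLast.count ',' :=
    List.count_pos_iff.mpr (by simpa using hc)
  omega

-- class 2 unpacked: an option list with at least two options exists
theorem class_two_opts (l : String) (h2 : pvClass l = 2) :
    ∃ o1 o2 os, pvLineOptions? l = some (o1 :: o2 :: os) := by
  rw [pvClass_eq] at h2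
  split_ifs at h2 with hb
  · cases hopt : pvLineOptions? l with
    | none => rw [pvBraceLine_eq_isSome, hopt] at hb; cases hb
    | some opts =>
      have hcon : ((pvVal l).drop 1).dropLast.contains ',' = true := by
        by_contra hc
        simp only [Bool.not_eq_true] at hc
        rw [hc] at h2
        simp at h2
      have h2l := opts_two l opts hopt hcon
      rcases opts with _ | ⟨o1, _ | ⟨o2, os⟩⟩
      · exact absurd h2l (by simp)
      · exact absurd h2l (by simp)
      · exact ⟨o1, o2, os, rfl⟩

-- class other than 2, but an option list: exactly one option
theorem class_ne_two_opts (l : String) (hne : pvClass l ≠ 2) (opts : List String)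
    (hopt : pvLineOptions? l = some opts) : ∃ o, opts = [o] := by
  apply opts_single l opts hopt
  by_contra hc
  apply hne
  simp only [Bool.not_eq_false] at hc
  rw [pvClass_eq]
  rw [if_pos (by rw [pvBraceLine_eq_isSome, hopt]; rfl), hc]
  rfl

theorem foldl_append_exists {β : Type} (g : β → List String) :
    ∀ (opts : List β) (a : List String),
      ∃ s, opts.foldl (fun a o => a ++ g o) a = a ++ s := by
  intro opts
  induction opts with
  | nil => intro a; exact ⟨[], by simp⟩
  | cons o os ih =>
    intro a
    obtain ⟨s, hs⟩ := ih (a ++ g o)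
    exact ⟨_, by rw [List.foldl_cons, hs, List.append_assoc]⟩

-- a suffix containing a non-expandable line leaves a nonempty leak list
theorem H_ne_nil_of_any (ls : List String)
    (h : ls.any (fun x => pvClass x == 0) = true) :
    (ls.foldr pvStepB ([[]], [])).2 ≠ [] := by
  induction ls with
  | nil => cases h
  | cons l rest ih =>
    simp only [List.foldr_cons]
    cases hopt : pvLineOptions? l with
    | none => simp [pvStepB, hopt]
    | some opts =>
      have hcl : (pvClass l == 0) = false := by
        rw [pvClass_eq, if_pos (by rw [pvBraceLine_eq_isSome, hopt]; rfl)]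
        simp
      have hrest : rest.any (fun x => pvClass x == 0) = true := by
        simp only [List.any_cons, hcl, Bool.false_or] at h
        exact h
      have hH := ih hrest
      obtain ⟨o, os, hops⟩ :
          ∃ o os, opts = o :: os := by
        match opts, opts_ne_nil l opts hopt with
        | o :: os, _ => exact ⟨o, os, rfl⟩
      simp only [pvStepB, hopt]
      rw [stepB_foldl_snd]
      obtain ⟨s, hs⟩ := foldl_append_exists
        (fun opt => (opt :: (rest.foldr pvStepB ([[]], [])).2).dropLast) os
        ((o :: (rest.foldr pvStepB ([[]], [])).2).dropLast)
      rw [hops]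
      simp only [List.foldl_cons, List.nil_append]
      rw [hs]
      rw [List.dropLast_cons_of_ne_nil hH]
      simp

-- both result lists always have the same length
theorem len_eq (ls : List String) :
    (ls.foldr pvStepB ([[]], [])).1.length = (expand_content_alt ls).length := by
  induction ls with
  | nil => simp [expand_content_alt]
  | cons l rest ih =>
    simp only [List.foldr_cons]
    rw [alt_cons]
    cases hopt : pvLineOptions? l with
    | none => simp [pvStepB, hopt, ih]
    | some opts =>
      simp only [pvStepB, hopt, Option.getD_some]
      rw [stepB_foldl_fst_length]
      simp only [List.length_nil, Nat.zero_add, List.length_flatMap, List.length_map, ih]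
      rw [List.map_const', List.sum_replicate, smul_eq_mul, mul_comm]

-- B's result is never empty
theorem alt_pos (ls : List String) : 1 ≤ (expand_content_alt ls).length := by
  induction ls with
  | nil => simp [expand_content_alt]
  | cons l rest ih =>
    rw [alt_cons]
    cases hopt : pvLineOptions? l with
    | none =>
      simp only [Option.getD_none]
      simpa using ih
    | some opts =>
      obtain ⟨o, os, hops⟩ :
          ∃ o os, opts = o :: os := by
        match opts, opts_ne_nil l opts hopt with
        | o :: os, _ => exact ⟨o, os, rfl⟩
      subst hops
      simp only [Option.getD_some, List.flatMap_cons]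
      rw [List.length_append, List.length_map]
      omega

theorem head_eq_aux (rest : List String) (r0A : List String) (RA' : List (List String))
    (r0B : List String) (RB' : List (List String))
    (hRA : (rest.foldr pvStepB ([[]], [])).1 = r0A :: RA')
    (hRB : expand_content_alt rest = r0B :: RB')
    (ih : (rest.foldr pvStepB ([[]], [])).1.head? = (expand_content_alt rest).head?) :
    r0A = r0B := by
  rw [hRA, hRB] at ih
  simpa using ih

-- the first result row always agrees
theorem head_eq (ls : List String) :
    (ls.foldr pvStepB ([[]], [])).1.head? = (expand_content_alt ls).head? := by
  induction ls with
  | nil => simp [expand_content_alt]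
  | cons l rest ih =>
    simp only [List.foldr_cons]
    rw [alt_cons]
    cases hopt : pvLineOptions? l with
    | none => simp [pvStepB, hopt, List.head?_map, ih]
    | some opts =>
      obtain ⟨o, os, hops⟩ :
          ∃ o os, opts = o :: os := by
        match opts, opts_ne_nil l opts hopt with
        | o :: os, _ => exact ⟨o, os, rfl⟩
      subst hops
      cases hRB : expand_content_alt rest with
      | nil =>
        have hl := len_eq rest
        rw [hRB] at hl
        simp only [List.length_nil] at hl
        simp only [pvStepB, hopt]
        refine Eq.trans (b := (none : Option (List String))) ?_ ?_
        · rw [List.head?_eq_none_iff]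
          apply List.length_eq_zero_iff.mp
          rw [stepB_foldl_fst_length, hl]
          simp
        · simp only [Option.getD_some, List.flatMap_cons, List.map_nil, List.nil_append]
          rw [show (List.flatMap (fun (_ : String) => ([] : List (List String))) os) = []
              by simp [List.flatMap_eq_nil_iff]]
          rfl
      | cons r0B RB' =>
        have hl := len_eq rest
        rw [hRB] at hl
        cases hRA : (rest.foldr pvStepB ([[]], [])).1 with
        | nil => rw [hRA] at hl; simp at hl
        | cons r0A RA' =>
          have hh := head_eq_aux rest r0A RA' r0B RB' hRA hRB ih
          simp only [pvStepB, hopt]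
          obtain ⟨s, hs⟩ := stepB_foldl_fst_exists (rest.foldr pvStepB ([[]], [])).1
            (rest.foldr pvStepB ([[]], [])).2 os
            ([] ++ (rest.foldr pvStepB ([[]], [])).1.map (fun row => [] ++ o :: row))
            ([] ++ (o :: (rest.foldr pvStepB ([[]], [])).2).dropLast)
          rw [List.foldl_cons, hs, hRA]
          simp [hh, hRB]

-- first two blocks of A's result on a multi-option line
theorem multi_fst (R : List (List String)) (H : List String) (o1 o2 : String) (os : List String) :
    ∃ s, ((o1 :: o2 :: os).foldl
        (fun (acc : List (List String) × List String) opt =>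
          (acc.1 ++ R.map (fun row => acc.2 ++ opt :: row),
           acc.2 ++ (opt :: H).dropLast)) ([], [])).1 =
      R.map (fun row => o1 :: row) ++
      (R.map (fun row => (o1 :: H).dropLast ++ o2 :: row) ++ s) := by
  obtain ⟨s, hs⟩ := stepB_foldl_fst_exists R H os
    ([] ++ R.map (fun row => [] ++ o1 :: row) ++
      R.map (fun row => ([] ++ (o1 :: H).dropLast) ++ o2 :: row))
    (([] ++ (o1 :: H).dropLast) ++ (o2 :: H).dropLast)
  refine ⟨s, ?_⟩
  rw [List.foldl_cons, List.foldl_cons, hs]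
  simp [List.append_assoc]

-- inside D_ the leak makes the results differ
theorem A_ne_B_of_D (lines : List String) (hD : D_expand_content lines) :
    (lines.foldr pvStepB ([[]], [])).1 ≠ expand_content_alt lines := by
  induction lines with
  | nil =>
    unfold D_expand_content at hD
    simp at hD
  | cons l rest ih =>
    unfold D_expand_content at hD
    by_cases hc : (pvClass l != 2) = true
    · have hD' : D_expand_content rest := by
        unfold D_expand_content
        simpa [List.dropWhile_cons, hc] using hD
      have hne := ih hD'
      simp only [List.foldr_cons]
      rw [alt_cons]
      cases hopt : pvLineOptions? l with
      | none =>
        simp only [pvStepB, hopt, Option.getD_none]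
        intro heq
        apply hne
        simp only [List.flatMap_cons, List.flatMap_nil, List.append_nil] at heq
        exact List.map_injective_iff.mpr (fun a b h => by simpa using h) heq
      | some opts =>
        obtain ⟨o, rfl⟩ := class_ne_two_opts l (by simpa using hc) opts hopt
        simp only [pvStepB, hopt, Option.getD_some, List.foldl_cons, List.foldl_nil,
          List.flatMap_cons, List.flatMap_nil, List.append_nil, List.nil_append]
        intro heq
        apply hne
        exact List.map_injective_iff.mpr (fun a b h => by simpa using h) heq
    · have hc2 : pvClass l = 2 := by simpa using hc
      have hdrop : List.dropWhile (fun x => pvClass x != 2) (l :: rest) = l :: rest := by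
        rw [List.dropWhile_cons, show (pvClass l != 2) = false from by simp [hc2]]
        simp
      have hany : rest.any (fun x => pvClass x == 0) = true := by
        rw [hdrop] at hD
        simpa using hD
      obtain ⟨o1, o2, os, hopt⟩ := class_two_opts l hc2
      have hH := H_ne_nil_of_any rest hany
      simp only [List.foldr_cons]
      rw [alt_cons, hopt]
      intro heq
      simp only [pvStepB, hopt, Option.getD_some] at heq
      obtain ⟨s, hs⟩ := multi_fst (rest.foldr pvStepB ([[]], [])).1
        (rest.foldr pvStepB ([[]], [])).2 o1 o2 os
      rw [hs] at heq
      simp only [List.flatMap_cons] at heq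
      cases hRB : expand_content_alt rest with
      | nil =>
        have := alt_pos rest
        rw [hRB] at this
        simp at this
      | cons r0B RB' =>
        have hlen := len_eq rest
        rw [hRB] at hlen
        cases hRA : (rest.foldr pvStepB ([[]], [])).1 with
        | nil => rw [hRA] at hlen; simp at hlen
        | cons r0A RA' =>
          have hr0 : r0A = r0B := by
            have hh := head_eq rest
            rw [hRA, hRB] at hh
            simpa using hh
          have hlen1 : (List.map (fun row => o1 :: row)
              (rest.foldr pvStepB ([[]], [])).1).length =
              (List.map (fun row => o1 :: row) (expand_content_alt rest)).length := by
            simp [len_eq rest]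
          obtain ⟨-, htail⟩ := List.append_inj heq hlen1
          rw [hRA, hRB] at htail
          simp only [List.map_cons, List.cons_append, List.cons.injEq] at htail
          obtain ⟨hhead, -⟩ := htail
          have hlen2 := congrArg List.length hhead
          simp only [List.length_append, List.length_cons, hr0] at hlen2
          have hp : ((o1 :: (rest.foldr pvStepB ([[]], [])).2).dropLast).length = 0 := by
            omega
          rw [List.dropLast_cons_of_ne_nil hH] at hp
          simp at hp

-- ===== VERDICT (by name: the statements are the Claim_ definitions above) =====
theorem expand_content_spec : Claim_unchanged_expand_content := by
  intro lines _ hD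
  unfold expand_content
  rw [pvDfsA_eq]
  simpa using foldr_stepB_eq_alt lines hD

theorem expand_content_changed : Claim_changed_expand_content := by
  unfold Claim_changed_expand_content; decide

theorem expand_content_tight : Claim_exact_expand_content := by
  intro lines _ hD
  unfold expand_content
  rw [pvDfsA_eq]
  simpa using A_ne_B_of_D lines hD
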